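-- pv_equiv track=rewrite | github.com/gpoesia/socratic-tutor | analysis_turing_test.py | remove_duplicate_responses
-- ===== SOURCE A (Python) =====
-- def remove_duplicate_responses(exerciseResponses):
--     '''for each question, extract the lastest response'''
--     qa = {}
--
--     for item in exerciseResponses:
--         if item == {}: continue
--         q = item["question"]
--         a = item["answer"]
--         timestamp  = item["timestamp"]
--         if (q not in qa) or (q in qa and timestamp> qa[q]["timestamp"]):
--             qa[q] = {"answer":a, "timestamp": timestamp}
--     return qa
-- ===== SOURCE B (Python) =====
-- def _extract(item):
--     if item == {}:
--         return None
--     return (item["question"], item["answer"], item["timestamp"])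
--
--
-- def remove_duplicate_responses(exerciseResponses):
--     '''for each question, extract the lastest response'''
--     groups = {}
--     for item in exerciseResponses:
--         e = _extract(item)
--         if e is None:
--             continue
--         q, a, t = e
--         groups.setdefault(q, []).append({"answer": a, "timestamp": t})
--     return {q: max(g, key=lambda r: r["timestamp"]) for q, g in groups.items()}
-- ===== Notes on version B (the rewrite author's own statement) =====
-- stated objective: alternative
-- what changed: A keeps a running latest-response dict updated in place; B first groups all responses per question into lists and then reduces each group with max(key=timestamp), preserving first-wins on ties.
import Mathlib
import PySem

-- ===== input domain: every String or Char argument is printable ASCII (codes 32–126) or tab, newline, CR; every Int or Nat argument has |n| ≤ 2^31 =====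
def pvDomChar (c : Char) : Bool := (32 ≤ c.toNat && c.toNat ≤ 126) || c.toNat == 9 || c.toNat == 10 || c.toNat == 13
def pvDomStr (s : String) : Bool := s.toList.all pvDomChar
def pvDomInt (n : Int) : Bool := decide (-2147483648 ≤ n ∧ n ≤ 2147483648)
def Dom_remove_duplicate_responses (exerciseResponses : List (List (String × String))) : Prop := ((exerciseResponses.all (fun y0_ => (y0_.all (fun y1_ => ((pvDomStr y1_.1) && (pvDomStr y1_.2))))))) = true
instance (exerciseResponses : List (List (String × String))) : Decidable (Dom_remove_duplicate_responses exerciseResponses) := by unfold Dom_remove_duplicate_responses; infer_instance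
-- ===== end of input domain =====

-- B replaces A's in-place running-max dict update by a group-by-question pass followed by a
-- per-group max(, key=timestamp) reduction (alternative decomposition, same asymptotic cost).


-- ===== PORT A =====
def remove_duplicate_responses (exerciseResponses : List (List (String × String))) : List (String × List (String × String)) :=
  (exerciseResponses.foldl
    (fun (qa : PySem.Dict String (PySem.Dict String String)) item =>
      if item = [] then qa  -- 'if item == {}: continue'
      else
        match (PySem.Dict.ofList item).get? "question",
              (PySem.Dict.ofList item).get? "answer",
              (PySem.Dict.ofList item).get? "timestamp" with
        | some q, some a, some t =>
            if !qa.contains q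
               || (qa.contains q && decide ((qa.getD q PySem.Dict.empty).getD "timestamp" "" < t))
            then qa.insert q ((PySem.Dict.empty.insert "answer" a).insert "timestamp" t)
            else qa
        | _, _, _ => qa)  -- a missing key is a KeyError in Python; such inputs are excluded by Pre_
    PySem.Dict.empty).items.map (fun p => (p.1, p.2.items))

-- ===== PORT B =====
-- Source B's helper _extract: None for the empty dict / a missing key (KeyError, outside Pre_)
def pvExtract (item : List (String × String)) : Option (String × String × String) :=
  if item = [] then none
  else
    ((PySem.Dict.ofList item).get? "question").bind (fun q =>
      ((PySem.Dict.ofList item).get? "answer").bind (fun a =>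
        ((PySem.Dict.ofList item).get? "timestamp").map (fun t => (q, a, t))))

def remove_duplicate_responses_alt (exerciseResponses : List (List (String × String))) : List (String × List (String × String)) :=
  let groups : PySem.Dict String (List (PySem.Dict String String)) :=
    exerciseResponses.foldl
      (fun g item =>
        match pvExtract item with
        | none => g
        | some (q, a, t) =>
            g.modify q [] (fun l => l ++ [(PySem.Dict.empty.insert "answer" a).insert "timestamp" t]))
      PySem.Dict.empty
  groups.items.map (fun p =>
    (p.1, ((PySem.List.max? p.2 (fun r => r.getD "timestamp" "")).getD PySem.Dict.empty).items))

-- ===== PRECONDITION & SPEC =====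
-- Pre_ excludes exactly the inputs where Python A raises KeyError: a non-empty response dict
-- missing one of the keys "question", "answer", "timestamp" (B raises there too).
def Pre_remove_duplicate_responses (exerciseResponses : List (List (String × String))) : Prop :=
  ∀ item ∈ exerciseResponses, item ≠ [] →
    (PySem.Dict.ofList item).contains "question" = true ∧
    (PySem.Dict.ofList item).contains "answer" = true ∧
    (PySem.Dict.ofList item).contains "timestamp" = true
instance (exerciseResponses : List (List (String × String))) : Decidable (Pre_remove_duplicate_responses exerciseResponses) := by unfold Pre_remove_duplicate_responses; infer_instance

def pvWitness_remove_duplicate_responses : (List (List (String × String))) :=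
  ([[("question", "q1"), ("answer", "yes"), ("timestamp", "2")],
    [],
    [("question", "q1"), ("answer", "no"), ("timestamp", "3")]])

def Spec_remove_duplicate_responses (exerciseResponses : List (List (String × String))) (out : List (String × List (String × String))) : Prop := out = remove_duplicate_responses_alt exerciseResponses
instance (exerciseResponses : List (List (String × String))) (out : List (String × List (String × String))) : Decidable (Spec_remove_duplicate_responses exerciseResponses out) := by unfold Spec_remove_duplicate_responses; infer_instance

-- ===== CLAIM (what is proved, stated in full; the proofs are below) =====
def Claim_equal_remove_duplicate_responses : Prop := ∀ (exerciseResponses : List (List (String × String))), Dom_remove_duplicate_responses exerciseResponses → Pre_remove_duplicate_responses exerciseResponses → Spec_remove_duplicate_responses exerciseResponses (remove_duplicate_responses exerciseResponses)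

-- ===== LEMMAS AND PROOFS =====

-- the common per-item event: (question, stored response dict)
def pvMkResp (a t : String) : PySem.Dict String String :=
  (PySem.Dict.empty.insert "answer" a).insert "timestamp" t

def pvTs (r : PySem.Dict String String) : String := r.getD "timestamp" ""

def pvPairs (xs : List (List (String × String))) : List (String × PySem.Dict String String) :=
  xs.filterMap (fun item => (pvExtract item).map (fun e => (e.1, pvMkResp e.2.1 e.2.2)))

def pvStepA (qa : PySem.Dict String (PySem.Dict String String))
    (p : String × PySem.Dict String String) : PySem.Dict String (PySem.Dict String String) :=
  if !qa.contains p.1 || (qa.contains p.1 && decide (pvTs (qa.getD p.1 PySem.Dict.empty) < pvTs p.2))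
  then qa.insert p.1 p.2 else qa

def pvStepG (g : PySem.Dict String (List (PySem.Dict String String)))
    (p : String × PySem.Dict String String) : PySem.Dict String (List (PySem.Dict String String)) :=
  g.modify p.1 [] (fun l => l ++ [p.2])

def pvBest (l : List (PySem.Dict String String)) : PySem.Dict String String :=
  (PySem.List.max? l pvTs).getD PySem.Dict.empty

def pvF (p : String × List (PySem.Dict String String)) : String × PySem.Dict String String :=
  (p.1, pvBest p.2)

lemma pvBest_singleton (v : PySem.Dict String String) : pvBest [v] = v := by
  simp [pvBest, PySem.List.max?, List.foldl]

lemma pvStepA_mk (qa : PySem.Dict String (PySem.Dict String String)) (q a t : String) :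
    pvStepA qa (q, pvMkResp a t)
      = if !qa.contains q
           || (qa.contains q && decide ((qa.getD q PySem.Dict.empty).getD "timestamp" "" < t))
        then qa.insert q ((PySem.Dict.empty.insert "answer" a).insert "timestamp" t)
        else qa := by
  simp [pvStepA, pvTs, pvMkResp, PySem.Dict.getD_insert_self]

lemma pvBest_append (l : List (PySem.Dict String String)) (v : PySem.Dict String String)
    (h : l ≠ []) : pvBest (l ++ [v]) = if pvTs (pvBest l) < pvTs v then v else pvBest l := by
  cases hm : PySem.List.max? l pvTs with
  | none => exact absurd ((PySem.List.max?_eq_none_iff l pvTs).1 hm) h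
  | some m =>
      have h2 : PySem.List.max? (l ++ [v]) pvTs
          = if pvTs m < pvTs v then some v else some m := by
        unfold PySem.List.max? at hm ⊢
        rw [List.foldl_append, hm]
        rfl
      unfold pvBest
      rw [h2, hm]
      by_cases hlt : pvTs m < pvTs v <;> simp [hlt]

-- A's fold over the raw items is the fold of pvStepA over the extracted event list
lemma pvFoldA (xs : List (List (String × String))) (qa : PySem.Dict String (PySem.Dict String String)) :
    xs.foldl
      (fun qa item =>
        if item = [] then qa
        else
          match (PySem.Dict.ofList item).get? "question",
                (PySem.Dict.ofList item).get? "answer",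
                (PySem.Dict.ofList item).get? "timestamp" with
          | some q, some a, some t =>
              if !qa.contains q
                 || (qa.contains q && decide ((qa.getD q PySem.Dict.empty).getD "timestamp" "" < t))
              then qa.insert q ((PySem.Dict.empty.insert "answer" a).insert "timestamp" t)
              else qa
          | _, _, _ => qa) qa
    = (pvPairs xs).foldl pvStepA qa := by
  induction xs generalizing qa with
  | nil => rfl
  | cons item rest ih =>
      rw [List.foldl_cons, pvPairs, List.filterMap_cons, ← pvPairs]
      have hstep :
          (if item = [] then qa
           else
             match (PySem.Dict.ofList item).get? "question",
                   (PySem.Dict.ofList item).get? "answer",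
                   (PySem.Dict.ofList item).get? "timestamp" with
             | some q, some a, some t =>
                 if !qa.contains q
                    || (qa.contains q && decide ((qa.getD q PySem.Dict.empty).getD "timestamp" "" < t))
                 then qa.insert q ((PySem.Dict.empty.insert "answer" a).insert "timestamp" t)
                 else qa
             | _, _, _ => qa)
          = match pvExtract item with
            | none => qa
            | some e => pvStepA qa (e.1, pvMkResp e.2.1 e.2.2) := by
        unfold pvExtract
        by_cases hnil : item = []
        · simp [hnil]
        · simp only [if_neg hnil]
          cases hq : (PySem.Dict.ofList item).get? "question" <;>
          cases ha : (PySem.Dict.ofList item).get? "answer" <;>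
          cases ht : (PySem.Dict.ofList item).get? "timestamp" <;>
            simp [pvStepA_mk]
      cases he : pvExtract item <;>
        simp only [hstep, he, Option.map_none, Option.map_some, List.foldl_cons] <;>
        exact ih _

-- B's grouping fold over the raw items is the fold of pvStepG over the same event list
lemma pvFoldG (xs : List (List (String × String))) (g : PySem.Dict String (List (PySem.Dict String String))) :
    xs.foldl
      (fun g item =>
        match pvExtract item with
        | none => g
        | some (q, a, t) =>
            g.modify q [] (fun l => l ++ [(PySem.Dict.empty.insert "answer" a).insert "timestamp" t])) g
    = (pvPairs xs).foldl pvStepG g := by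
  induction xs generalizing g with
  | nil => rfl
  | cons item rest ih =>
      rw [List.foldl_cons, pvPairs, List.filterMap_cons, ← pvPairs]
      cases he : pvExtract item with
      | none =>
          simp only [Option.map_none]
          exact ih _
      | some e =>
          simp only [Option.map_some, List.foldl_cons]
          exact ih _

-- main invariant: A's dict is the image under pvF of B's groups dict
lemma pvMain (ps : List (String × PySem.Dict String String)) :
    ∀ (qa : PySem.Dict String (PySem.Dict String String))
      (g : PySem.Dict String (List (PySem.Dict String String))),
      qa.items = g.items.map pvF → g.keys.Nodup → (∀ r ∈ g.items, r.2 ≠ []) →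
      (ps.foldl pvStepA qa).items = ((ps.foldl pvStepG g).items.map pvF) := by
  induction ps with
  | nil => intro qa g hitems _ _; simpa using hitems
  | cons p rest ih =>
      intro qa g hitems hnd hne
      rw [List.foldl_cons, List.foldl_cons]
      have hcont : qa.contains p.1 = g.contains p.1 := by
        simp only [PySem.Dict.contains, hitems, List.any_map]; rfl
      have hkeys : qa.keys = g.keys := by
        simp only [PySem.Dict.keys, hitems, List.map_map]; rfl
      by_cases hc : g.contains p.1 = true
      · -- existing question
        have hval : g.get? p.1 = some (g.getD p.1 []) := by
          cases hg : g.get? p.1 with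
          | none =>
              exact absurd ((PySem.Dict.get?_eq_none_iff_not_mem_keys g p.1).1 hg)
                (not_not_intro ((PySem.Dict.contains_iff_mem_keys g p.1).1 hc))
          | some v => simp [PySem.Dict.getD_eq_get?_getD, hg]
        have hmemg : (p.1, g.getD p.1 []) ∈ g.items :=
          PySem.Dict.mem_items_of_get?_eq_some g hval
        have hqa : qa.getD p.1 PySem.Dict.empty = pvBest (g.getD p.1 []) := by
          have hmemqa : (p.1, pvBest (g.getD p.1 [])) ∈ qa.items := by
            rw [hitems]; exact List.mem_map.2 ⟨_, hmemg, rfl⟩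
          exact PySem.Dict.getD_of_mem_items qa hmemqa (by rw [hkeys]; exact hnd) _
        have hgne : g.getD p.1 [] ≠ [] := hne _ hmemg
        have hbest : pvBest (g.getD p.1 [] ++ [p.2])
            = if pvTs (pvBest (g.getD p.1 [])) < pvTs p.2 then p.2 else pvBest (g.getD p.1 []) :=
          pvBest_append _ _ hgne
        have hstepG : pvStepG g p = g.insert p.1 (g.getD p.1 [] ++ [p.2]) := by
          simp [pvStepG, PySem.Dict.modify]
        have hitemsG : (pvStepG g p).items
            = g.items.map (fun r => if r.1 == p.1 then (p.1, g.getD p.1 [] ++ [p.2]) else r) := by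
          rw [hstepG]; exact PySem.Dict.items_insert_of_contains g _ hc
        have hndG : (pvStepG g p).keys.Nodup := by
          rw [hstepG, PySem.Dict.keys_insert_of_contains g _ hc]; exact hnd
        have hneG : ∀ r ∈ (pvStepG g p).items, r.2 ≠ [] := by
          intro r hr
          rw [hitemsG] at hr
          rcases List.mem_map.1 hr with ⟨r', hr', rfl⟩
          by_cases hr1 : r'.1 == p.1
          · simp [hr1]
          · simp only [hr1, if_neg, Bool.false_eq_true, not_false_eq_true]
            exact hne _ hr'
        by_cases hlt : pvTs (pvBest (g.getD p.1 [])) < pvTs p.2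
        · -- strictly newer timestamp: A overwrites the stored response
          have hstepA : pvStepA qa p = qa.insert p.1 p.2 := by
            simp only [pvStepA, hcont, hqa]
            simp [hc, hlt]
          refine ih _ _ ?_ hndG hneG
          rw [hstepA, PySem.Dict.items_insert_of_contains qa p.2 (by rw [hcont]; exact hc),
            hitemsG, hitems, List.map_map, List.map_map]
          refine List.map_congr_left (fun r hr => ?_)
          by_cases hr1 : r.1 = p.1
          · simp [pvF, Function.comp, hr1, hbest, hlt]
          · simp [pvF, Function.comp, hr1]
        · -- not strictly newer: A keeps the stored response
          have hstepA : pvStepA qa p = qa := by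
            simp only [pvStepA, hcont, hqa]
            simp [hc, hlt]
          refine ih _ _ ?_ hndG hneG
          rw [hstepA, hitemsG, hitems, List.map_map]
          refine List.map_congr_left (fun r hr => ?_)
          by_cases hr1 : r.1 = p.1
          · have hr2 : r.2 = g.getD p.1 [] := by
              have : (p.1, r.2) ∈ g.items := by
                have := hr
                rw [show (p.1, r.2) = r from by rw [← hr1]]
                exact hr
              rw [PySem.Dict.getD_of_mem_items g this hnd ([] : List (PySem.Dict String String))]
            simp [pvF, Function.comp, hr1, hbest, hlt, hr2]
          · simp [pvF, Function.comp, hr1]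
      · -- new question: A inserts, B starts a fresh singleton group
        have hc' : g.contains p.1 = false := by simpa using hc
        have hstepA : pvStepA qa p = qa.insert p.1 p.2 := by
          simp [pvStepA, hcont, hc']
        have hstepG : pvStepG g p = g.insert p.1 [p.2] := by
          simp only [pvStepG, PySem.Dict.modify,
            PySem.Dict.getD_of_not_contains g ([] : List (PySem.Dict String String)) hc']
          rfl
        refine ih _ _ ?_ ?_ ?_
        · rw [hstepA, PySem.Dict.items_insert_of_not_contains qa p.2 (by rw [hcont]; exact hc'),
            hstepG, PySem.Dict.items_insert_of_not_contains g _ hc', List.map_append, hitems]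
          simp [pvF, pvBest_singleton]
        · rw [hstepG, PySem.Dict.keys_insert_of_not_contains g _ hc']
          refine List.nodup_append.2 ⟨hnd, List.nodup_singleton _, ?_⟩
          intro x hx y hy
          rw [List.mem_singleton] at hy
          subst hy
          intro hxy
          exact hc ((PySem.Dict.contains_iff_mem_keys g p.1).2 (hxy ▸ hx))
        · intro r hr
          rw [hstepG, PySem.Dict.items_insert_of_not_contains g _ hc'] at hr
          rcases List.mem_append.1 hr with h | h
          · exact hne _ h
          · simp only [List.mem_singleton] at h; subst h; simp

-- ===== VERDICT (by name: the statement is the Claim_ definition above) =====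
theorem remove_duplicate_responses_spec : Claim_equal_remove_duplicate_responses := by
  intro xs _ _
  unfold Spec_remove_duplicate_responses remove_duplicate_responses remove_duplicate_responses_alt
  rw [pvFoldA, pvFoldG]
  rw [pvMain (pvPairs xs) PySem.Dict.empty PySem.Dict.empty rfl
    (by simp [PySem.Dict.keys, PySem.Dict.empty]) (by simp [PySem.Dict.empty])]
  rw [List.map_map]
  rfl
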